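-- pv_equiv track=rewrite | github.com/Kris-Nale314/better-notes | ui_utils/ui_enhance.py | process_issue_section
-- ===== SOURCE A (Python) =====
-- def process_issue_section(section_lines, severity):
--     """
--     Process a section of issues to format individual issues as cards.
--
--     Args:
--         section_lines: List of lines in the section
--         severity: Severity level of this section
--
--     Returns:
--         List of processed lines
--     """
--     # Import re module explicitly to avoid namespace issues
--     import re as regex_module
--
--     # First line is the section header, keep it
--     result = [section_lines[0], ""]
--
--     # Process the rest of the section
--     issue_blocks = []
--     current_issue = []
--
--     # Check if there are any issues in this section
--     no_issues_found = False
--     for line in section_lines[1:]: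
--         if "No critical issues were identified" in line or "No high-priority issues were identified" in line or \
--            "No medium-priority issues were identified" in line or "No low-priority issues were identified" in line:
--             no_issues_found = True
--             result.append(line)
--             break
--
--     if no_issues_found:
--         return result
--
--     # Process each issue
--     i = 1
--     while i < len(section_lines):
--         line = section_lines[i]
--
--         # Check for issue title (level 3 header)
--         if line.startswith("### "):
--             if current_issue:
--                 issue_blocks.append(current_issue)
--             current_issue = [line]
--         elif current_issue:
--             current_issue.append(line)
--         i += 1
--
--     # Add the last issue
--     if current_issue:
--         issue_blocks.append(current_issue)
--
--     # Format each issue block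
--     for issue in issue_blocks:
--         card_lines = []
--
--         # Extract title from first line (### Title)
--         title = issue[0][4:].strip() if issue and issue[0].startswith("### ") else "Issue"
--
--         # Start issue card
--         card_lines.append(f'<div class="issue-card issue-{severity}">')
--         card_lines.append(f'<h3>{title}</h3>')
--
--         # Add the rest of the issue content
--         for line in issue[1:]:
--             card_lines.append(line)
--
--         # Close issue card
--         card_lines.append('</div>')
--
--         # Add to result
--         result.extend(card_lines)
--
--     return result
-- ===== SOURCE B (Python) =====
-- SENTINELS = (
--     "No critical issues were identified",
--     "No high-priority issues were identified",
--     "No medium-priority issues were identified",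
--     "No low-priority issues were identified",
-- )
--
--
-- def process_issue_section(section_lines, severity):
--     """Format an issue section as HTML cards in one streaming pass."""
--     header = section_lines[0]
--     tail = section_lines[1:]
--
--     # Early sentinel pre-scan: first "No ... issues were identified" line wins.
--     for line in tail:
--         if any(s in line for s in SENTINELS):
--             return [header, "", line]
--
--     out = [header, ""]
--     open_card = False
--     for line in tail:
--         if line.startswith("### "):
--             if open_card:
--                 out.append("</div>")
--             out.append(f'<div class="issue-card issue-{severity}">')
--             out.append(f'<h3>{line[4:].strip()}</h3>')
--             open_card = True
--         elif open_card:
--             out.append(line)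
--     if open_card:
--         out.append("</div>")
--     return out
-- ===== Notes on version B (the rewrite author's own statement) =====
-- stated objective: simpler
-- what changed: Replaced A's two-pass scheme (group lines into issue_blocks, then format each block into card lines) by a single streaming pass over the tail that keeps only an open-card flag, emitting the card opening on each '### ' header and closing the previous card as it goes; the intermediate list-of-blocks disappears.
import Mathlib
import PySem

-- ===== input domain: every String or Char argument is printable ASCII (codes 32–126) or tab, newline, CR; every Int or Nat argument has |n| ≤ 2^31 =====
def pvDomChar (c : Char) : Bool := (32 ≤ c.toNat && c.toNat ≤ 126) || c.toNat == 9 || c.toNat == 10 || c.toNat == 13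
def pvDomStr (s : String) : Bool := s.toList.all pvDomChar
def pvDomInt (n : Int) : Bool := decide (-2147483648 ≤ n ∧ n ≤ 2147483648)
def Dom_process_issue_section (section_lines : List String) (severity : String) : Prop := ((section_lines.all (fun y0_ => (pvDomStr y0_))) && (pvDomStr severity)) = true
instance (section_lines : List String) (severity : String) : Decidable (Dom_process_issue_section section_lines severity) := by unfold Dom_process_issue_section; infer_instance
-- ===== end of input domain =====

-- B replaces A's two-pass build-blocks-then-format-blocks scheme by a single streaming
-- pass with an "open card" flag (objective: simpler).

-- ===== PORT A =====

-- A's four-way `in` check inside the sentinel loop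
def pvASentinel (line : String) : Bool :=
  PySem.Str.isIn "No critical issues were identified" line ||
  PySem.Str.isIn "No high-priority issues were identified" line ||
  PySem.Str.isIn "No medium-priority issues were identified" line ||
  PySem.Str.isIn "No low-priority issues were identified" line

-- A's first loop: append the first matching line and break (none = no match)
def pvAScan : List String → Option String
  | [] => none
  | l :: ls => if pvASentinel l then some l else pvAScan ls

-- A's while-loop grouping into (issue_blocks, current_issue)
def pvAGroup : List String → List (List String) × List String → List (List String) × List String
  | [], st => st
  | l :: ls, (blocks, current) =>
    if PySem.Str.startswith l "### " then
      pvAGroup ls ((if current ≠ [] then blocks ++ [current] else blocks), [l])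
    else if current ≠ [] then
      pvAGroup ls (blocks, current ++ [l])
    else
      pvAGroup ls (blocks, current)

-- A's per-block formatting (card_lines)
def pvAFmt (severity : String) (issue : List String) : List String :=
  let title :=
    match issue with
    | [] => "Issue"
    | l :: _ =>
        if PySem.Str.startswith l "### " then PySem.Str.strip (PySem.Str.slice l (some 4) none)
        else "Issue"
  ["<div class=\"issue-card issue-" ++ severity ++ "\">", "<h3>" ++ title ++ "</h3>"]
    ++ issue.drop 1 ++ ["</div>"]

def process_issue_section (section_lines : List String) (severity : String) : List String :=
  -- section_lines[0] raises IndexError on []; excluded by Pre_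
  let result := [PySem.List.pyGetD section_lines 0 "", ""]
  match pvAScan (section_lines.drop 1) with
  | some line => result ++ [line]
  | none =>
    let st := pvAGroup (section_lines.drop 1) ([], [])
    let blocks := if st.2 ≠ [] then st.1 ++ [st.2] else st.1
    blocks.foldl (fun acc issue => acc ++ pvAFmt severity issue) result

-- ===== PORT B =====

def pvSENTINELS : List String :=
  ["No critical issues were identified",
   "No high-priority issues were identified",
   "No medium-priority issues were identified",
   "No low-priority issues were identified"]

-- B's streaming step: state = (output so far, open-card flag)
def pvBStep (severity : String) (st : List String × Bool) (line : String) : List String × Bool :=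
  if PySem.Str.startswith line "### " then
    ((if st.2 then st.1 ++ ["</div>"] else st.1)
       ++ ["<div class=\"issue-card issue-" ++ severity ++ "\">",
           "<h3>" ++ PySem.Str.strip (PySem.Str.slice line (some 4) none) ++ "</h3>"],
     true)
  else if st.2 then (st.1 ++ [line], st.2)
  else st

def process_issue_section_alt (section_lines : List String) (severity : String) : List String :=
  let header := PySem.List.pyGetD section_lines 0 ""
  let tail := section_lines.drop 1
  match tail.find? (fun line => pvSENTINELS.any (fun s => PySem.Str.isIn s line)) with
  | some line => [header, "", line]
  | none =>
    let st := tail.foldl (pvBStep severity) ([header, ""], false)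
    if st.2 then st.1 ++ ["</div>"] else st.1

-- ===== PRECONDITION & SPEC =====
-- Pre_ excludes only the empty list, on which A raises IndexError at section_lines[0].
def Pre_process_issue_section (section_lines : List String) (_severity : String) : Prop :=
  section_lines ≠ []
instance (section_lines : List String) (severity : String) : Decidable (Pre_process_issue_section section_lines severity) := by unfold Pre_process_issue_section; infer_instance

def pvWitness_process_issue_section : List String × String :=
  (["## High-Priority Issues", "### Leak", "details"], "high")

def Spec_process_issue_section (section_lines : List String) (severity : String) (out : List String) : Prop := out = process_issue_section_alt section_lines severity
instance (section_lines : List String) (severity : String) (out : List String) : Decidable (Spec_process_issue_section section_lines severity out) := by unfold Spec_process_issue_section; infer_instance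

-- ===== CLAIM (what is proved, stated in full; the proofs are below) =====
def Claim_equal_process_issue_section : Prop := ∀ (section_lines : List String) (severity : String), Dom_process_issue_section section_lines severity → Pre_process_issue_section section_lines severity → Spec_process_issue_section section_lines severity (process_issue_section section_lines severity)

-- ===== LEMMAS AND PROOFS =====

-- proof-only abbreviation for B's final "close the open card" step (definitionally B's if)
def pvBClose (st : List String × Bool) : List String :=
  if st.2 then st.1 ++ ["</div>"] else st.1

-- the open part of a card: everything pvAFmt emits except the closing </div>
def pvPartial (severity : String) : List String → List String
  | [] => []
  | l :: t =>
      ["<div class=\"issue-card issue-" ++ severity ++ "\">",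
       "<h3>" ++ PySem.Str.strip (PySem.Str.slice l (some 4) none) ++ "</h3>"] ++ t

-- invariant on A's current_issue: empty, or headed by a "### " line
def pvINV : List String → Prop
  | [] => True
  | l :: _ => PySem.Str.startswith l "### " = true

-- A's finalize-and-format of a grouping state
def pvAFin (severity : String) (st : List (List String) × List String) : List String :=
  (if st.2 ≠ [] then st.1 ++ [st.2] else st.1).flatMap (pvAFmt severity)

lemma pvAFmt_eq_partial (severity : String) (cur : List String) (h : pvINV cur) (hne : cur ≠ []) :
    pvAFmt severity cur = pvPartial severity cur ++ ["</div>"] := by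
  cases cur with
  | nil => exact absurd rfl hne
  | cons l t => simp [pvAFmt, pvPartial, pvINV] at h ⊢; simp [h]

lemma pvASentinel_eq (line : String) :
    pvASentinel line = pvSENTINELS.any (fun s => PySem.Str.isIn s line) := by
  simp [pvASentinel, pvSENTINELS, List.any, Bool.or_assoc]

lemma pvAScan_eq_find? (ls : List String) :
    pvAScan ls = ls.find? (fun line => pvSENTINELS.any (fun s => PySem.Str.isIn s line)) := by
  induction ls with
  | nil => rfl
  | cons l ls ih =>
      by_cases h : pvASentinel l = true
      · simp only [pvAScan, h, if_true]
        rw [List.find?_cons_of_pos (by rw [← pvASentinel_eq]; exact h)]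
      · simp only [pvAScan, h]
        rw [List.find?_cons_of_neg (by rw [← pvASentinel_eq]; simpa using h), ih]
        simp

lemma pvAGroup_blocks (ls : List String) (blocks : List (List String)) (cur : List String) :
    pvAGroup ls (blocks, cur)
      = (blocks ++ (pvAGroup ls ([], cur)).1, (pvAGroup ls ([], cur)).2) := by
  induction ls generalizing blocks cur with
  | nil => simp [pvAGroup]
  | cons l ls ih =>
      simp only [pvAGroup, List.nil_append]
      split_ifs with h1 h2
      · rw [ih (blocks ++ [cur]) [l], ih [cur] [l]]
        simp
      · exact ih blocks [l]
      · exact ih blocks (cur ++ [l])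
      · exact ih blocks cur

lemma pvAFin_append (severity : String) (pre bs : List (List String)) (c : List String) :
    pvAFin severity (pre ++ bs, c) = pre.flatMap (pvAFmt severity) ++ pvAFin severity (bs, c) := by
  unfold pvAFin
  by_cases h : c = [] <;> simp [h]

-- the key invariant: B's streaming loop computes A's grouped-then-formatted output
lemma pvMain (severity : String) (ls : List String) :
    ∀ (cur acc : List String) (b : Bool), pvINV cur → (b = true ↔ cur ≠ []) →
    pvBClose (ls.foldl (pvBStep severity) (acc ++ pvPartial severity cur, b))
      = acc ++ pvAFin severity (pvAGroup ls ([], cur)) := by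
  induction ls with
  | nil =>
      intro cur acc b hinv hb
      cases cur with
      | nil =>
          have hbf : b = false := by
            cases b with
            | false => rfl
            | true => exact absurd rfl (hb.mp rfl)
          subst hbf
          simp [pvBClose, pvAGroup, pvAFin, pvPartial]
      | cons c t =>
          have hbt : b = true := hb.mpr (by simp)
          subst hbt
          simp [pvBClose, pvAGroup, pvAFin,
                pvAFmt_eq_partial severity (c :: t) hinv (by simp)]
  | cons l ls ih =>
      intro cur acc b hinv hb
      rw [List.foldl_cons]
      cases hl : PySem.Str.startswith l "### " with
      | true =>
          have hl' : PySem.Chars.startswith l.toList ['#', '#', '#', ' '] = true := by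
            simpa using hl
          have hstep : pvBStep severity (acc ++ pvPartial severity cur, b) l
              = ((acc ++ (if cur ≠ [] then pvAFmt severity cur else []))
                   ++ pvPartial severity [l], true) := by
            cases cur with
            | nil =>
                have hbf : b = false := by
                  cases b with
                  | false => rfl
                  | true => exact absurd rfl (hb.mp rfl)
                subst hbf
                simp [pvBStep, hl', pvPartial]
            | cons c t =>
                have hbt : b = true := hb.mpr (by simp)
                subst hbt
                simp [pvBStep, hl', pvPartial,
                      pvAFmt_eq_partial severity (c :: t) hinv (by simp)]
          rw [hstep, ih [l] _ true (by simpa [pvINV] using hl') (by simp)]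
          rw [show pvAGroup (l :: ls) ([], cur)
                = pvAGroup ls ((if cur ≠ [] then [cur] else []), [l]) from by
              simp [pvAGroup, hl']]
          rw [pvAGroup_blocks ls (if cur ≠ [] then [cur] else []) [l], pvAFin_append]
          by_cases hc : cur = [] <;> simp [hc]
      | false =>
          have hl' : PySem.Chars.startswith l.toList ['#', '#', '#', ' '] = false := by
            simpa using hl
          cases cur with
          | nil =>
              have hbf : b = false := by
                cases b with
                | false => rfl
                | true => exact absurd rfl (hb.mp rfl)
              subst hbf
              have hstep : pvBStep severity (acc ++ pvPartial severity [], false) l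
                  = (acc ++ pvPartial severity [], false) := by
                simp [pvBStep, hl']
              rw [hstep,
                  show pvAGroup (l :: ls) ([], ([] : List String)) = pvAGroup ls ([], []) from by
                    simp [pvAGroup, hl']]
              exact ih [] acc false trivial (by simp)
          | cons c t =>
              have hbt : b = true := hb.mpr (by simp)
              subst hbt
              have hstep : pvBStep severity (acc ++ pvPartial severity (c :: t), true) l
                  = (acc ++ pvPartial severity ((c :: t) ++ [l]), true) := by
                simp [pvBStep, hl', pvPartial]
              rw [hstep,
                  show pvAGroup (l :: ls) ([], c :: t) = pvAGroup ls ([], (c :: t) ++ [l]) from by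
                    simp [pvAGroup, hl']]
              exact ih ((c :: t) ++ [l]) acc true (by simpa [pvINV] using hinv) (by simp)

-- ===== VERDICT (by name: the statement is the Claim_ definition above) =====
theorem process_issue_section_spec : Claim_equal_process_issue_section := by
  intro section_lines severity _ _
  simp only [Spec_process_issue_section, process_issue_section, process_issue_section_alt]
  rw [pvAScan_eq_find?]
  rcases hf : (section_lines.drop 1).find?
      (fun line => pvSENTINELS.any (fun s => PySem.Str.isIn s line)) with _ | line
  · have hmain := pvMain severity (section_lines.drop 1)
        [] [PySem.List.pyGetD section_lines 0 "", ""] false trivial (by simp)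
    simp only [pvPartial, List.append_nil, pvBClose] at hmain
    rw [PySem.List.foldl_append_eq_flatMap, hmain]
    simp [pvAFin]
  · simp
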